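-- pv_equiv track=rewrite | github.com/Dhami0007/CMPUT331A6 | a6p4.py | freqDict
-- ===== SOURCE A (Python) =====
-- ETAOIN = "ETAOINSHRDLCUMWFGYPBVKJXQZ"
--
-- def freqDict(ciphertext: str) -> dict:
--     """
--     This function is from a5p1.py
--     Analyze the frequency of the letters
--     """
--     res_dict = dict()
--     for c in ciphertext:
--         c = c.upper()
--         if c in ETAOIN:
--             res_dict[c] = res_dict.get(c,0) + 1
--
--     freq_tracker = [0 for _ in range(len(res_dict.keys()))]     # This will be used to make the encryption valid
--
--     val_order = list(res_dict.values())
--     val_order.sort(reverse=True)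
--     alpha_order = list(res_dict.keys())
--     alpha_order.sort()
--     # This will val_order the number of occurences in descending val_order
--     for key in alpha_order:
--         val = res_dict[key]
--         idx = val_order.index(val)
--
--         freq_tracker[idx] += 1
--         # We will be adding this because val_order.index() will give us index of the first occurence,
--         # then this will make it point to the actual index after that
--         idx += (freq_tracker[idx] - 1)
--
--         # Overwriting the keys
--         res_dict[key] = ETAOIN[idx]
--
--     return res_dict
-- ===== SOURCE B (Python) =====
-- ETAOIN = "ETAOINSHRDLCUMWFGYPBVKJXQZ"
--
-- def freqDict(ciphertext: str) -> dict:
--     """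
--     Analyze the frequency of the letters.
--
--     Same counting loop as before, but the rank of each letter is computed
--     directly: a letter's ETAOIN index is the number of letters that beat it
--     (higher count, or equal count and alphabetically smaller).
--     """
--     res_dict = dict()
--     for c in ciphertext:
--         c = c.upper()
--         if c in ETAOIN:
--             res_dict[c] = res_dict.get(c, 0) + 1
--     return {k: ETAOIN[sum(1 for j, m in res_dict.items()
--                           if m > n or (m == n and j < k))]
--             for k, n in res_dict.items()}
-- ===== Notes on version B (the rewrite author's own statement) =====
-- stated objective: simpler
-- what changed: Keeps the counting loop but replaces A's descending value sort, list.index scan and freq_tracker bookkeeping by a direct rank count: each letter's ETAOIN index is the number of letters with a higher count, or an equal count and an alphabetically smaller letter.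
import Mathlib
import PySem

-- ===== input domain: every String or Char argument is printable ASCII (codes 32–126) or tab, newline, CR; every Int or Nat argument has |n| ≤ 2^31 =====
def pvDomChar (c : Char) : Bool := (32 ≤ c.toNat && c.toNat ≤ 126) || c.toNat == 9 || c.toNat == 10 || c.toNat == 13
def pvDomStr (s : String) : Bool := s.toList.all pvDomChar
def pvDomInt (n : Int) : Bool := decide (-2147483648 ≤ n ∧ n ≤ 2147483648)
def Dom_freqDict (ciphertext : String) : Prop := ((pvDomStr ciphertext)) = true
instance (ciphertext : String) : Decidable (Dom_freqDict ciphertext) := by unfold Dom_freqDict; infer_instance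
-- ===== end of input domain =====

-- B replaces A's sort/list.index/freq_tracker ranking machinery by a direct count of the letters
-- that outrank each letter (higher count, or equal count and alphabetically smaller); objective: simpler.

def ETAOIN : String := "ETAOINSHRDLCUMWFGYPBVKJXQZ"

-- ETAOIN[i] as a 1-char string; both Pythons evaluate it only at in-range indices (< #distinct letters ≤ 26)
def etaoinAt (i : Int) : String := ((PySem.Str.pyGet? ETAOIN i).map (fun ch => String.ofList [ch])).getD ""

-- the counting loop both Source A and Source B begin with, verbatim
def countLetters (ciphertext : String) : PySem.Dict String Int :=
  ciphertext.toList.foldl (fun d c =>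
    let u := String.ofList (PySem.Chars.upper [c])
    if PySem.Str.isIn u ETAOIN then d.insert u (d.getD u 0 + 1) else d) PySem.Dict.empty

-- ===== PORT A =====
-- Python's res_dict changes value type in place (int counts overwritten by letter strings); Lean dicts
-- are monomorphic, so the letter dict starts from resDict's keys in the same order with placeholder ""
-- and each key is overwritten exactly once, as in Python (reads of res_dict[key] only ever see counts).
def freqDict (ciphertext : String) : List (String × String) :=
  let resDict := countLetters ciphertext
  let freqTracker : List Int := List.replicate resDict.keys.length 0
  let valOrder := PySem.List.sorted resDict.values (fun v => v) true
  let alphaOrder := PySem.List.sorted resDict.keys (fun k => k) false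
  let init : PySem.Dict String String := PySem.Dict.mk (resDict.items.map (fun p => (p.1, "")))
  let final := alphaOrder.foldl (fun (st : List Int × PySem.Dict String String) key =>
      let val := resDict.getD key 0
      let idx0 : Nat := (PySem.List.index? valOrder val).getD 0  -- val ∈ valOrder: .index never raises
      let ft := st.1.set idx0 (st.1.getD idx0 0 + 1)             -- freq_tracker[idx] += 1 (idx0 in range)
      let idx : Int := (idx0 : Int) + (ft.getD idx0 0 - 1)
      (ft, st.2.insert key (etaoinAt idx))) (freqTracker, init)
  final.2.items

-- ===== PORT B =====
def freqDict_alt (ciphertext : String) : List (String × String) :=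
  let resDict := countLetters ciphertext
  resDict.items.map (fun p =>
    (p.1, etaoinAt ((resDict.items.countP
        (fun q => q.2 > p.2 || (q.2 == p.2 && q.1 < p.1)) : Nat) : Int)))

-- ===== PRECONDITION & SPEC =====
def Spec_freqDict (ciphertext : String) (out : List (String × String)) : Prop := out = freqDict_alt ciphertext
instance (ciphertext : String) (out : List (String × String)) : Decidable (Spec_freqDict ciphertext out) := by unfold Spec_freqDict; infer_instance

-- ===== CLAIM (what is proved, stated in full; the proofs are below) =====
def Claim_equal_freqDict : Prop := ∀ (ciphertext : String), Dom_freqDict ciphertext → Spec_freqDict ciphertext (freqDict ciphertext)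

-- ===== LEMMAS AND PROOFS =====

-- B's rank predicate over keys: does k' outrank k in d?
def rankP (d : PySem.Dict String Int) (k : String) : String → Bool :=
  fun k' => decide (d.getD k 0 < d.getD k' 0) || (d.getD k' 0 == d.getD k 0 && decide (k' < k))

-- A's loop body, named (the lambda in freqDict is definitionally this function)
def stepA (d : PySem.Dict String Int) (vo : List Int)
    (st : List Int × PySem.Dict String String) (key : String) : List Int × PySem.Dict String String :=
  let val := d.getD key 0
  let idx0 : Nat := (PySem.List.index? vo val).getD 0
  let ft := st.1.set idx0 (st.1.getD idx0 0 + 1)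
  let idx : Int := (idx0 : Int) + (ft.getD idx0 0 - 1)
  (ft, st.2.insert key (etaoinAt idx))

-- the first index of a present value in a descending-sorted list counts the strictly larger entries
theorem index?_desc (l : List Int) (h : l.Pairwise (fun a b => b ≤ a)) (v : Int) (hv : v ∈ l) :
    PySem.List.index? l v = some (l.countP (fun w => decide (v < w))) := by
  induction l with
  | nil => cases hv
  | cons x t ih =>
    rcases List.pairwise_cons.mp h with ⟨hx, ht⟩
    by_cases hxv : x = v
    · subst hxv
      rw [PySem.List.index?_cons_self]
      have h0 : (t.countP (fun w => decide (x < w))) = 0 := by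
        rw [List.countP_eq_zero]
        intro w hw
        simpa using not_lt.mpr (hx w hw)
      simp [h0]
    · have hvt : v ∈ t := by cases hv with
        | head => exact absurd rfl hxv
        | tail _ h => exact h
      rw [PySem.List.index?_cons_of_ne t hxv, ih ht hvt]
      have hvx : v < x := lt_of_le_of_ne (hx v hvt) (fun h' => hxv h'.symm)
      simp [hvx]

-- countP of a disjunction of pointwise-disjoint predicates splits
theorem countP_or_disjoint {α : Type} (l : List α) (p q : α → Bool)
    (h : ∀ x ∈ l, ¬(p x = true ∧ q x = true)) :
    l.countP (fun x => p x || q x) = l.countP p + l.countP q := by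
  induction l with
  | nil => simp
  | cons x t ih =>
    have hx := h x (List.mem_cons_self)
    have ht : ∀ y ∈ t, ¬(p y = true ∧ q y = true) := fun y hy => h y (List.mem_cons_of_mem x hy)
    by_cases hp : p x = true <;> by_cases hq : q x = true <;>
      simp [hp, hq, ih ht] at hx ⊢ <;> omega

-- countP over the descending-sorted value list = countP over the keys of the corresponding counts
theorem countP_VO (d : PySem.Dict String Int) (hnd : d.keys.Nodup) (p : Int → Bool) :
    (PySem.List.sorted d.values (fun v => v) true).countP p
      = d.keys.countP (fun k' => p (d.getD k' 0)) := by
  rw [List.Perm.countP_eq p (PySem.List.sorted_perm _ _ _),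
      PySem.Dict.values_eq_map_keys d hnd 0, List.countP_map]
  rfl

-- list.index into the descending value list, characterised over the keys
theorem idx0_eq (d : PySem.Dict String Int) (hnd : d.keys.Nodup) (v : Int) (hv : v ∈ d.values) :
    PySem.List.index? (PySem.List.sorted d.values (fun v => v) true) v
      = some (d.keys.countP (fun k' => decide (v < d.getD k' 0))) := by
  rw [index?_desc _ (PySem.List.sorted_pairwise_rev _ _) v
      (((PySem.List.sorted_perm _ _ _).mem_iff).mpr hv), countP_VO d hnd]

-- two present values with the same first index are equal
theorem idx0_inj (d : PySem.Dict String Int) (hnd : d.keys.Nodup) (v v' : Int)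
    (hv : v ∈ d.values) (hv' : v' ∈ d.values)
    (h : d.keys.countP (fun k' => decide (v < d.getD k' 0))
       = d.keys.countP (fun k' => decide (v' < d.getD k' 0))) : v = v' := by
  have h1 := idx0_eq d hnd v hv
  have h2 := idx0_eq d hnd v' hv'
  rw [← h] at h2
  obtain ⟨hk1, he1, -⟩ := PySem.List.getElem_of_index?_eq_some h1
  obtain ⟨hk2, he2, -⟩ := PySem.List.getElem_of_index?_eq_some h2
  rw [← he1, ← he2]

theorem loopA (d : PySem.Dict String Int) (hnd : d.keys.Nodup) (l : List String) :
    ∀ (P : List String), P ++ l = PySem.List.sorted d.keys (fun k => k) false →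
    ∀ (ft : List Int) (res : PySem.Dict String String),
    ft.length = d.keys.length →
    (∀ v ∈ d.values,
      ft.getD ((PySem.List.index? (PySem.List.sorted d.values (fun v => v) true) v).getD 0) 0
        = (P.countP (fun k' => d.getD k' 0 == v) : Int)) →
    res.items = d.items.map (fun p =>
      if p.1 ∈ P then (p.1, etaoinAt (d.keys.countP (rankP d p.1) : Int)) else (p.1, "")) →
    ((l.foldl (stepA d (PySem.List.sorted d.values (fun v => v) true)) (ft, res)).2).items
      = d.items.map (fun p =>
          if p.1 ∈ P ++ l then (p.1, etaoinAt (d.keys.countP (rankP d p.1) : Int)) else (p.1, "")) := by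
  induction l with
  | nil => intro P hPl ft res _ _ hres; simpa using hres
  | cons k t ih =>
    intro P hPl ft res hlen hft hres
    -- facts about the sorted key list and k's position in it
    have hAOp : (PySem.List.sorted d.keys (fun k => k) false).Perm d.keys :=
      PySem.List.sorted_perm _ _ _
    have hAOnd : (PySem.List.sorted d.keys (fun k => k) false).Nodup := hAOp.nodup_iff.mpr hnd
    have hAOle : (PySem.List.sorted d.keys (fun k => k) false).Pairwise (fun a b => a ≤ b) :=
      PySem.List.sorted_pairwise d.keys (fun k => k)
    have hAOlt : (PySem.List.sorted d.keys (fun k => k) false).Pairwise (fun a b => a < b) :=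
      (hAOle.and hAOnd).imp (fun h => lt_of_le_of_ne h.1 h.2)
    rw [← hPl] at hAOlt hAOnd
    obtain ⟨-, hpkt, hcross⟩ := List.pairwise_append.mp hAOlt
    have haP : ∀ a ∈ P, a < k := fun a ha => hcross a ha k List.mem_cons_self
    have htk : ∀ b ∈ t, k < b := (List.pairwise_cons.mp hpkt).1
    have hkP : k ∉ P := fun hk => lt_irrefl k (haP k hk)
    have hkmem : k ∈ d.keys := hAOp.mem_iff.mp (by
      rw [← hPl]; exact List.mem_append_right _ List.mem_cons_self)
    -- facts about k's count and its index in the descending value list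
    have hCk : d.getD k 0 ∈ d.values := by
      rw [PySem.Dict.values_eq_map_keys d hnd 0]
      exact List.mem_map_of_mem hkmem
    have hidxk := idx0_eq d hnd (d.getD k 0) hCk
    obtain ⟨hi0lt, hVOi0, -⟩ := PySem.List.getElem_of_index?_eq_some hidxk
    have hVOlen : (PySem.List.sorted d.values (fun v => v) true).length = d.keys.length := by
      rw [PySem.List.length_sorted, PySem.Dict.values_eq_map_keys d hnd 0, List.length_map]
    have hi0ft : d.keys.countP (fun k' => decide (d.getD k 0 < d.getD k' 0)) < ft.length := by
      rw [hlen]; rw [hVOlen] at hi0lt; exact hi0lt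
    -- abbreviations
    set i0 : Nat := d.keys.countP (fun k' => decide (d.getD k 0 < d.getD k' 0)) with hi0def
    have hsetD : (ft.set i0 (ft.getD i0 0 + 1)).getD i0 0 = ft.getD i0 0 + 1 := by
      simp [List.getD_eq_getElem?_getD, hi0ft]
    have hftk := hft (d.getD k 0) hCk
    rw [hidxk, Option.getD_some] at hftk
    -- the count of smaller same-valued keys: over all keys vs over the processed prefix P
    have htrans : d.keys.countP (fun k' => d.getD k' 0 == d.getD k 0 && decide (k' < k))
        = P.countP (fun k' => d.getD k' 0 == d.getD k 0) := by
      rw [← List.Perm.countP_eq _ hAOp, ← hPl, List.countP_append]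
      have h1 : P.countP (fun k' => d.getD k' 0 == d.getD k 0 && decide (k' < k))
          = P.countP (fun k' => d.getD k' 0 == d.getD k 0) :=
        List.countP_congr (fun a ha => by simp [haP a ha])
      have h2 : (k :: t).countP (fun k' => d.getD k' 0 == d.getD k 0 && decide (k' < k)) = 0 := by
        rw [List.countP_eq_zero]
        intro a ha
        cases ha with
        | head => simp
        | tail _ hat => simp [not_lt.mpr (le_of_lt (htk a hat))]
      rw [h1, h2]
      omega
    -- A's index for k equals B's rank of k
    have hrank : (i0 : Int) + ((ft.set i0 (ft.getD i0 0 + 1)).getD i0 0 - 1)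
        = (d.keys.countP (rankP d k) : Int) := by
      have hsplit : d.keys.countP (rankP d k)
          = d.keys.countP (fun k' => decide (d.getD k 0 < d.getD k' 0))
            + d.keys.countP (fun k' => d.getD k' 0 == d.getD k 0 && decide (k' < k)) := by
        apply countP_or_disjoint
        intro x _ hc
        rcases hc with ⟨h1, h2⟩
        simp only [decide_eq_true_eq, Bool.and_eq_true, beq_iff_eq] at h1 h2
        omega
      rw [hsetD, hftk, hsplit, htrans]
      push_cast
      ring
    -- step the fold once
    rw [List.foldl_cons]
    have hstep : stepA d (PySem.List.sorted d.values (fun v => v) true) (ft, res) k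
        = (ft.set i0 (ft.getD i0 0 + 1),
           res.insert k (etaoinAt ((i0 : Int) + ((ft.set i0 (ft.getD i0 0 + 1)).getD i0 0 - 1)))) := by
      simp only [stepA, hidxk, Option.getD_some]
    rw [hstep]
    -- apply the induction hypothesis at P ++ [k]
    have hres_contains : res.contains k = true := by
      have hfst : res.items.map Prod.fst = d.items.map Prod.fst := by
        rw [hres, List.map_map]
        apply List.map_congr_left
        intro p _
        by_cases h : p.1 ∈ P <;> simp [h]
      rw [PySem.Dict.contains_iff_mem_keys]
      show k ∈ res.items.map Prod.fst
      rw [hfst]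
      exact hkmem
    have hres' : (res.insert k (etaoinAt ((i0 : Int)
          + ((ft.set i0 (ft.getD i0 0 + 1)).getD i0 0 - 1)))).items
        = d.items.map (fun p => if p.1 ∈ P ++ [k]
            then (p.1, etaoinAt (d.keys.countP (rankP d p.1) : Int)) else (p.1, "")) := by
      rw [PySem.Dict.items_insert_of_contains res _ hres_contains, hres, List.map_map]
      apply List.map_congr_left
      intro p _
      obtain ⟨a, b⟩ := p
      by_cases hak : a = k
      · subst hak
        simp [Function.comp, hkP, List.mem_append]
        exact congrArg etaoinAt (by simpa [List.getD_eq_getElem?_getD] using hrank)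
      · by_cases haP' : a ∈ P <;>
          simp [Function.comp, haP', hak, List.mem_append]
    have hft' : ∀ v ∈ d.values,
        (ft.set i0 (ft.getD i0 0 + 1)).getD
          ((PySem.List.index? (PySem.List.sorted d.values (fun v => v) true) v).getD 0) 0
        = ((P ++ [k]).countP (fun k' => d.getD k' 0 == v) : Int) := by
      intro v hv
      rw [idx0_eq d hnd v hv, Option.getD_some, List.countP_append]
      by_cases hveq : v = d.getD k 0
      · subst hveq
        rw [← hi0def, hsetD, hftk]
        simp
      · have hne : d.keys.countP (fun k' => decide (v < d.getD k' 0)) ≠ i0 := by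
          intro h
          exact hveq (idx0_inj d hnd v (d.getD k 0) hv hCk (h.trans hi0def))
        have hgd : (ft.set i0 (ft.getD i0 0 + 1)).getD
            (d.keys.countP (fun k' => decide (v < d.getD k' 0))) 0
            = ft.getD (d.keys.countP (fun k' => decide (v < d.getD k' 0))) 0 := by
          simp [List.getD_eq_getElem?_getD, (Ne.symm hne)]
        rw [hgd]
        have := hft v hv
        rw [idx0_eq d hnd v hv, Option.getD_some] at this
        rw [this]
        have h0 : ([k].countP (fun k' => d.getD k' 0 == v)) = 0 := by
          have hb : (d.getD k 0 == v) = false := by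
            simp only [beq_eq_false_iff_ne, ne_eq]
            exact fun h => hveq h.symm
          simp [hb]
        rw [h0]
        simp
    have hPl' : (P ++ [k]) ++ t = PySem.List.sorted d.keys (fun k => k) false := by
      rw [List.append_assoc, List.singleton_append, hPl]
    have hfin := ih (P ++ [k]) hPl' (ft.set i0 (ft.getD i0 0 + 1)) _ (by simpa using hlen) hft' hres'
    rw [show (P ++ [k]) ++ t = P ++ k :: t from by simp] at hfin
    exact hfin

-- the counting loop never duplicates a key
theorem nodup_keys_countLetters (ct : String) : (countLetters ct).keys.Nodup := by
  simp only [countLetters]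
  suffices h : ∀ (l : List Char) (d : PySem.Dict String Int), d.keys.Nodup →
      (List.foldl (fun d c =>
        if PySem.Str.isIn (String.ofList (PySem.Chars.upper [c])) ETAOIN = true then
          d.insert (String.ofList (PySem.Chars.upper [c]))
            (d.getD (String.ofList (PySem.Chars.upper [c])) 0 + 1)
        else d) d l).keys.Nodup by
    exact h ct.toList PySem.Dict.empty PySem.Dict.nodup_keys_empty
  intro l
  induction l with
  | nil => intro d hd; exact hd
  | cons c t ih =>
    intro d hd
    rw [List.foldl_cons]
    apply ih
    split
    · exact PySem.Dict.nodup_keys_insert _ _ _ hd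
    · exact hd

-- freqDict, with its loop body named
theorem freqDict_eq_loop (ct : String) : freqDict ct
    = (((PySem.List.sorted (countLetters ct).keys (fun k => k) false).foldl
        (stepA (countLetters ct) (PySem.List.sorted (countLetters ct).values (fun v => v) true))
        (List.replicate (countLetters ct).keys.length 0,
          PySem.Dict.mk ((countLetters ct).items.map (fun p => (p.1, ""))))).2).items := rfl

-- ===== VERDICT (by name: the statement is the Claim_ definition above) =====
theorem freqDict_spec : Claim_equal_freqDict := by
  unfold Claim_equal_freqDict Spec_freqDict
  intro ct _
  have hnd := nodup_keys_countLetters ct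
  have hA := loopA (countLetters ct) hnd (PySem.List.sorted (countLetters ct).keys (fun k => k) false)
    [] rfl (List.replicate (countLetters ct).keys.length 0)
    (PySem.Dict.mk ((countLetters ct).items.map (fun p => (p.1, ""))))
    (by simp)
    (by
      intro v hv
      simp [List.getD_eq_getElem?_getD, List.getElem?_replicate]
      split <;> rfl)
    (by simp)
  rw [freqDict_eq_loop ct, hA]
  show _ = freqDict_alt ct
  unfold freqDict_alt
  apply List.map_congr_left
  intro p hp
  obtain ⟨k1, v1⟩ := p
  have hmem : k1 ∈ (countLetters ct).keys := PySem.Dict.mem_keys_of_mem_items _ hp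
  have hmemAO : k1 ∈ [] ++ PySem.List.sorted (countLetters ct).keys (fun k => k) false := by
    simpa using ((PySem.List.sorted_perm (countLetters ct).keys (fun k => k) false).mem_iff).mpr hmem
  have hp2 : (countLetters ct).getD k1 0 = v1 := PySem.Dict.getD_of_mem_items _ hp hnd 0
  have hcount : (countLetters ct).items.countP
      (fun q => decide (v1 < q.2) || (q.2 == v1 && decide (q.1 < k1)))
      = (countLetters ct).keys.countP (rankP (countLetters ct) k1) := by
    rw [PySem.Dict.items_eq_map_keys _ hnd 0, List.countP_map]
    apply List.countP_congr
    intro a _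
    simp [rankP, hp2]
  simp only [hmemAO, if_true]
  rw [hcount]
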